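-- pv_equiv track=rewrite | github.com/ReportFuco/API-tracking-WhatsApp | app/routes/finanzas/analitica.py | _month_sequence
-- ===== SOURCE A (Python) =====
-- def _previous_month(year: int, month: int) -> tuple[int, int]:
--     if month == 1:
--         return year - 1, 12
--     return year, month - 1
--
-- def _month_sequence(months: int, end_year: int, end_month: int) -> list[tuple[int, int]]:
--     sequence: list[tuple[int, int]] = []
--     current_year = end_year
--     current_month = end_month
--
--     for _ in range(months):
--         sequence.append((current_year, current_month))
--         current_year, current_month = _previous_month(current_year, current_month)
--
--     sequence.reverse()
--     return sequence
-- ===== SOURCE B (Python) =====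
-- def _month_sequence(months: int, end_year: int, end_month: int) -> list[tuple[int, int]]:
--     total = end_year * 12 + (end_month - 1)
--     return [(i // 12, i % 12 + 1) for i in range(total - months + 1, total + 1)]
-- ===== Notes on version B (the rewrite author's own statement) =====
-- stated objective: simpler
-- what changed: B maps the endpoint to an absolute month index and emits the ascending list with one range comprehension (i//12, i%12+1), replacing A's backward walk with a _previous_month helper, a mutable (year, month) pair and a final reverse; Pre_ excludes nonempty requests whose end_month lies outside 1..12, meaningless month values on which A's literal-decrement labels (month 0, 13, -1, ...) and B's calendar-normalized labels are equally arbitrary.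
-- outside the precondition, e.g. on _month_sequence(2, 2020, 0): A returns [(2020, -1), (2020, 0)], B returns [(2019, 11), (2019, 12)]; on _month_sequence(2, 2020, 13): A returns [(2020, 12), (2020, 13)], B returns [(2020, 12), (2021, 1)]
import Mathlib
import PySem

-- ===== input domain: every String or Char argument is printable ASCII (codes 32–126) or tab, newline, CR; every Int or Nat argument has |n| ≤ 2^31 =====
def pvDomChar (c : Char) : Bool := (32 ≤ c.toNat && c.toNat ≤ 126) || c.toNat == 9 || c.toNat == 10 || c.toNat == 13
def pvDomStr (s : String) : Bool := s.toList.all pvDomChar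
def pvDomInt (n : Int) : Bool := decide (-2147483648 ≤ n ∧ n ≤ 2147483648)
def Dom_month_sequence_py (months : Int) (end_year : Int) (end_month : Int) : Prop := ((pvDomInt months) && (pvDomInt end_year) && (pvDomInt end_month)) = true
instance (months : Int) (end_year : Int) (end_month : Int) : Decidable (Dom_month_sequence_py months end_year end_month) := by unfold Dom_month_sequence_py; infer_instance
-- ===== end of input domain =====

-- B maps the endpoint to an absolute month index and emits the ascending list with one
-- range comprehension, replacing A's backward walk + reverse (objective: simpler).


-- ===== PORT A =====
def previous_month_py (year : Int) (month : Int) : Int × Int :=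
  if month = 1 then (year - 1, 12) else (year, month - 1)

def msLoopA : Nat → Int → Int → List (Int × Int) → List (Int × Int)
  | 0, _, _, seq => seq
  | Nat.succ n, y, m, seq =>
      msLoopA n (previous_month_py y m).1 (previous_month_py y m).2 (seq ++ [(y, m)])

def month_sequence_py (months : Int) (end_year : Int) (end_month : Int) : List (Int × Int) :=
  (msLoopA months.toNat end_year end_month []).reverse

-- ===== PORT B =====
def month_sequence_py_alt (months : Int) (end_year : Int) (end_month : Int) : List (Int × Int) :=
  (PySem.List.pyRange (end_year * 12 + (end_month - 1) - months + 1)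
      (end_year * 12 + (end_month - 1) + 1) 1).map
    (fun i => (PySem.Int.floordiv i 12, PySem.Int.mod i 12 + 1))

-- ===== PRECONDITION & SPEC =====
-- Pre_ excludes nonempty requests whose end_month lies outside 1..12: such an end_month is
-- not a calendar month, and on those inputs A's literal-decrement labels (month 0, 13, -1, ...)
-- and B's calendar-normalized labels are equally defensible arbitrary choices, so nothing is
-- claimed there (this also excludes the large scaled inputs a timing run builds, whose
-- end_month grows past 12).
def Pre_month_sequence_py (months : Int) (end_year : Int) (end_month : Int) : Prop :=
  months ≤ 0 ∨ (1 ≤ end_month ∧ end_month ≤ 12)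
instance (months : Int) (end_year : Int) (end_month : Int) : Decidable (Pre_month_sequence_py months end_year end_month) := by unfold Pre_month_sequence_py; infer_instance

def pvWitness_month_sequence_py : Int × Int × Int := (3, 2021, 2)

def Spec_month_sequence_py (months : Int) (end_year : Int) (end_month : Int) (out : List (Int × Int)) : Prop := out = month_sequence_py_alt months end_year end_month
instance (months : Int) (end_year : Int) (end_month : Int) (out : List (Int × Int)) : Decidable (Spec_month_sequence_py months end_year end_month out) := by unfold Spec_month_sequence_py; infer_instance

-- ===== CLAIM =====
def Claim_equal_month_sequence_py : Prop := ∀ (months : Int) (end_year : Int) (end_month : Int), Dom_month_sequence_py months end_year end_month → Pre_month_sequence_py months end_year end_month → Spec_month_sequence_py months end_year end_month (month_sequence_py months end_year end_month)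

-- ===== LEMMAS AND PROOFS =====

-- closed form for the pair k months before (y, m) under A's stepping rule, for 1 ≤ m ≤ 12
def F (i : Int) : Int × Int := (PySem.Int.floordiv i 12, PySem.Int.mod i 12 + 1)

def prevPair (p : Int × Int) : Int × Int := previous_month_py p.1 p.2

lemma fdm (n q r : Int) (h : n = 12 * q + r) (h0 : 0 ≤ r) (h1 : r < 12) :
    PySem.Int.floordiv n 12 = q ∧ PySem.Int.mod n 12 = r := by
  have hq : PySem.Int.floordiv n 12 = q := by
    rw [PySem.Int.floordiv_eq_iff_of_pos (by norm_num)]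
    constructor <;> nlinarith
  refine ⟨hq, ?_⟩
  have hm := PySem.Int.floordiv_mul_add_mod n 12
  rw [hq] at hm
  omega

lemma mod12_bounds (n : Int) : 0 ≤ PySem.Int.mod n 12 ∧ PySem.Int.mod n 12 < 12 := by
  rw [PySem.Int.mod_eq_emod_of_pos (by norm_num)]
  omega

lemma F_step (i : Int) : prevPair (F i) = F (i - 1) := by
  obtain ⟨hr0, hr1⟩ := mod12_bounds i
  have hdec := PySem.Int.floordiv_mul_add_mod i 12
  by_cases hr : PySem.Int.mod i 12 = 0
  · have hdm := fdm (i - 1) (PySem.Int.floordiv i 12 - 1) 11 (by omega) (by norm_num) (by norm_num)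
    simp only [F, prevPair, previous_month_py, hdm.1, hdm.2]
    rw [if_pos (by omega)]
    norm_num
  · have hdm := fdm (i - 1) (PySem.Int.floordiv i 12) (PySem.Int.mod i 12 - 1)
      (by omega) (by omega) (by omega)
    simp only [F, prevPair, previous_month_py, hdm.1, hdm.2]
    rw [if_neg (by omega)]
    simp only [Prod.mk.injEq, true_and]
    omega

lemma F_endpoint (y m : Int) (h1 : 1 ≤ m) (h2 : m ≤ 12) : F (y * 12 + (m - 1)) = (y, m) := by
  have hdm := fdm (y * 12 + (m - 1)) y (m - 1) (by ring) (by omega) (by omega)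
  simp only [F, hdm.1, hdm.2]
  simp only [Prod.mk.injEq, true_and]
  omega

lemma iter_eq (k : Nat) (y m : Int) (h1 : 1 ≤ m) (h2 : m ≤ 12) :
    prevPair^[k] (y, m) = F (y * 12 + (m - 1) - (k : Int)) := by
  induction k with
  | zero => simp [F_endpoint y m h1 h2]
  | succ n ih =>
    rw [Function.iterate_succ_apply', ih, F_step]
    congr 1
    push_cast
    ring

lemma loop_eq (n : Nat) (y m : Int) (acc : List (Int × Int)) :
    msLoopA n y m acc = acc ++ (List.range n).map (fun k => prevPair^[k] (y, m)) := by
  induction n generalizing y m acc with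
  | zero => simp [msLoopA]
  | succ n ih =>
    rw [msLoopA, ih, List.range_succ_eq_map]
    simp only [List.map_cons, List.map_map]
    simp [prevPair, Function.comp_def, Function.iterate_succ_apply]

lemma rev_map_range {α : Type} (n : Nat) (f : Int → α) :
    ((List.range n).map (fun k : Nat => f (k : Int))).reverse
      = (List.range n).map (fun j : Nat => f ((n : Int) - 1 - (j : Int))) := by
  apply List.ext_getElem
  · simp
  · intro i h1 h2
    simp only [List.length_map, List.length_range] at h2
    rw [List.getElem_reverse]
    simp only [List.length_map, List.length_range, List.getElem_map, List.getElem_range]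
    congr 1
    omega

-- ===== VERDICT =====
theorem month_sequence_py_spec : Claim_equal_month_sequence_py := by
  intro months y m _ hpre
  unfold Spec_month_sequence_py month_sequence_py month_sequence_py_alt
  rcases hpre with h0 | ⟨h1, h2⟩
  · have hz : months.toNat = 0 := by omega
    rw [hz, PySem.List.pyRange_one]
    simp [msLoopA]
    omega
  · rw [loop_eq, List.nil_append,
      List.map_congr_left (fun k _ => iter_eq k y m h1 h2),
      rev_map_range months.toNat (fun k => F (y * 12 + (m - 1) - k)),
      PySem.List.pyRange_one]
    have hlen : (y * 12 + (m - 1) + 1 - (y * 12 + (m - 1) - months + 1)).toNat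
        = months.toNat := by omega
    rw [hlen, List.map_map]
    apply List.map_congr_left
    intro j hj
    rw [List.mem_range] at hj
    simp only [Function.comp]
    congr 1
    omega
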